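-- pv_equiv track=rewrite | github.com/lkubicki/python | karol.py | kolejna
-- ===== SOURCE A (Python) =====
-- def kolejna(poczatkowa, ktora):
--     kolejne = 0
--     aktualna = poczatkowa
--     while kolejne < ktora:
--         aktualna+=1
--         if '3' not in str(aktualna):
--             kolejne +=1
--     return aktualna
-- ===== SOURCE B (Python) =====
-- def _free(n):
--     # n >= 0: True iff decimal representation of n has no digit 3
--     while n > 0:
--         if n % 10 == 3:
--             return False
--         n //= 10
--     return True
--
--
-- def _cnt_below(x):
--     # x >= 0: how many 3-free naturals are < x (digit count, O(len(x)))
--     if x <= 0: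
--         return 0
--     q, r = divmod(x, 10)
--     add = (r if r <= 3 else r - 1) if _free(q) else 0
--     return 9 * _cnt_below(q) + add
--
--
-- def _decode(m):
--     # m >= 0: the m-th 3-free natural (0-based): base-9 digits mapped 0,1,2,4,...,9
--     if m <= 0:
--         return 0
--     q, r = divmod(m, 9)
--     return 10 * _decode(q) + (r if r < 3 else r + 1)
--
--
-- def kolejna(poczatkowa, ktora):
--     if ktora <= 0:
--         return poczatkowa
--     # rank of poczatkowa in the monotone enumeration of all 3-free integers
--     g = _cnt_below(poczatkowa + 1) - 1 if poczatkowa >= 0 else -_cnt_below(-poczatkowa)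
--     j = g + ktora
--     return _decode(j) if j >= 0 else -_decode(-j)
-- ===== Notes on version B (the rewrite author's own statement) =====
-- stated objective: faster
-- what changed: Instead of testing every successive integer's decimal string, B ranks the start in the monotone enumeration of 3-free integers by a digit-count pass and unranks rank+ktora through the base-9 digit bijection (digits 0,1,2,4..9), so the answer is computed in O(number of digits) arithmetic steps.
import Mathlib
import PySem

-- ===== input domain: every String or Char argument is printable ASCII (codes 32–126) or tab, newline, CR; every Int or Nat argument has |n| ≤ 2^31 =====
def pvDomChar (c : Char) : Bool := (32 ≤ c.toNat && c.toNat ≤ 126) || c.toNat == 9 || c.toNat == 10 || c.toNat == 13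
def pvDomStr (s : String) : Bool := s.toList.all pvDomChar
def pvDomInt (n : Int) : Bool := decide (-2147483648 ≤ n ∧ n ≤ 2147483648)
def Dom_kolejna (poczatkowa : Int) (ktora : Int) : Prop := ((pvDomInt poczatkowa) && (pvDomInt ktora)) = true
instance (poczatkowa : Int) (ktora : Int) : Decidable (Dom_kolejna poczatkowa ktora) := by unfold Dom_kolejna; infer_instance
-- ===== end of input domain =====

-- B replaces A's one-by-one scan with rank/unrank through the base-9 digit bijection onto
-- 3-free numbers (a digit-count pass plus a decode pass); objective: faster (asymptotic).

-- ===== PORT A =====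
-- A-side helpers.  The loop test `'3' not in str(aktualna)`:
def pvFreeStr (a : Int) : Bool := !(PySem.Str.isIn "3" (PySem.Int.toStr a))

-- "no decimal digit 3" on Nat; cited by A's termination measure (and by the proofs below)
def pvFreeN (n : Nat) : Bool :=
  if h : n = 0 then true else (decide (n % 10 ≠ 3)) && pvFreeN (n / 10)
decreasing_by exact Nat.div_lt_self (Nat.pos_of_ne_zero h) (by norm_num)

theorem pvFreeN_zero : pvFreeN 0 = true := by rw [pvFreeN]; simp

theorem pvFreeN_of_ne {n : Nat} (h : n ≠ 0) :
    pvFreeN n = ((decide (n % 10 ≠ 3)) && pvFreeN (n / 10)) := by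
  rw [pvFreeN, dif_neg h]

theorem pvFreeN_eq_false_iff (n : Nat) :
    pvFreeN n = false ↔ (n % 10 = 3 ∨ pvFreeN (n / 10) = false) := by
  by_cases hn : n = 0
  · subst hn
    simp [pvFreeN_zero, Nat.zero_div]
  · rw [pvFreeN_of_ne hn]
    by_cases h3 : n % 10 = 3 <;> simp [h3]

theorem pvDigitChar_eq_three : ∀ r : Nat, r < 10 → ((Nat.digitChar r = '3') ↔ r = 3) := by decide

theorem pvMem3_toDigitsCore (f : Nat) : ∀ n l, n ≤ f →
    (('3' ∈ Nat.toDigitsCore 10 (f + 1) n l) ↔ (pvFreeN n = false ∨ '3' ∈ l)) := by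
  induction f with
  | zero =>
    intro n l hn
    have hn0 : n = 0 := Nat.le_zero.mp hn
    subst hn0
    have hstep : Nat.toDigitsCore 10 1 0 l = '0' :: l := rfl
    rw [hstep]
    simp [pvFreeN_zero]
  | succ f ih =>
    intro n l hn
    have hstep : Nat.toDigitsCore 10 (f + 1 + 1) n l =
        if n / 10 = 0 then Nat.digitChar (n % 10) :: l
        else Nat.toDigitsCore 10 (f + 1) (n / 10) (Nat.digitChar (n % 10) :: l) := rfl
    have hd : (Nat.digitChar (n % 10) = '3') ↔ n % 10 = 3 :=
      pvDigitChar_eq_three _ (Nat.mod_lt _ (by norm_num))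
    rw [hstep]
    by_cases h0 : n / 10 = 0
    · rw [if_pos h0]
      rw [pvFreeN_eq_false_iff n, h0, pvFreeN_zero]
      simp only [List.mem_cons, hd]
      tauto
    · rw [if_neg h0]
      have hn0 : n ≠ 0 := by intro h; apply h0; simp [h]
      have hle : n / 10 ≤ f := by
        have := Nat.div_lt_self (Nat.pos_of_ne_zero hn0) (by norm_num : 1 < 10)
        omega
      rw [ih _ _ hle, pvFreeN_eq_false_iff n]
      simp only [List.mem_cons, hd]
      tauto

theorem pvMem3_toDigits (n : Nat) : ('3' ∈ Nat.toDigits 10 n) ↔ pvFreeN n = false := by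
  have h : Nat.toDigits 10 n = Nat.toDigitsCore 10 (n + 1) n [] := rfl
  rw [h, pvMem3_toDigitsCore n n [] le_rfl]
  simp

theorem pvMem3_toChars (a : Int) : ('3' ∈ PySem.Int.toChars a) ↔ pvFreeN a.natAbs = false := by
  rw [PySem.Int.toChars]
  by_cases ha : a < 0
  · rw [if_pos ha]
    simp only [List.mem_cons]
    rw [pvMem3_toDigits]
    simp
  · rw [if_neg ha]
    rw [show a.toNat = a.natAbs from by omega, pvMem3_toDigits]

theorem pvIsIn3_iff (a : Int) :
    PySem.Str.isIn "3" (PySem.Int.toStr a) = true ↔ pvFreeN a.natAbs = false := by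
  rw [PySem.Str.isIn_iff_infix, PySem.Int.toList_toStr,
    show ("3" : String).toList = ['3'] from rfl, List.singleton_infix_iff]
  exact pvMem3_toChars a

theorem pvFreeStr_eq (a : Int) : pvFreeStr a = pvFreeN a.natAbs := by
  unfold pvFreeStr
  cases hb : pvFreeN a.natAbs
  · have := (pvIsIn3_iff a).mpr hb
    rw [this]
    rfl
  · have : PySem.Str.isIn "3" (PySem.Int.toStr a) = false := by
      cases hi : PySem.Str.isIn "3" (PySem.Int.toStr a)
      · rfl
      · have := (pvIsIn3_iff a).mp hi
        rw [this] at hb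
        exact absurd hb (by simp)
    rw [this]
    rfl

theorem pvFreeN_pow10 (t : Nat) : pvFreeN (10 ^ t) = true := by
  induction t with
  | zero =>
    rw [pow_zero, pvFreeN_of_ne one_ne_zero]
    norm_num [pvFreeN_zero]
  | succ t iht =>
    have e1 : 10 ^ (t + 1) % 10 = 0 := by rw [pow_succ]; exact Nat.mul_mod_left _ _
    have e2 : 10 ^ (t + 1) / 10 = 10 ^ t := by rw [pow_succ]; omega
    have hne : (10:Nat) ^ (t + 1) ≠ 0 := by positivity
    rw [pvFreeN_of_ne hne, e1, e2, iht]
    norm_num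

theorem pvFree_exists (a : Int) : ∃ d : Nat, pvFreeStr (a + d + 1) = true := by
  set t := (a + 1).toNat + 1 with ht
  have h1 : t < 10 ^ t := Nat.lt_pow_self (by norm_num)
  have h2 : ((t : Nat) : Int) < ((10 ^ t : Nat) : Int) := by exact_mod_cast h1
  have h3 : a + 1 ≤ (t : Int) := by omega
  refine ⟨(((10 ^ t : Nat) : Int) - a - 1).toNat, ?_⟩
  have h4 : a + ((((10 ^ t : Nat) : Int) - a - 1).toNat : Int) + 1 = ((10 ^ t : Nat) : Int) := by
    omega
  rw [h4, pvFreeStr_eq]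
  have h5 : ((10 ^ t : Nat) : Int).natAbs = 10 ^ t := Int.natAbs_natCast _
  rw [h5]
  exact pvFreeN_pow10 t

-- distance (minus one) from `a` to the next 3-free integer: A's second termination component
def pvGap (a : Int) : Nat := Nat.find (pvFree_exists a)

theorem pvGap_lt {a : Int} (h : pvFreeStr (a + 1) = false) : pvGap (a + 1) < pvGap a := by
  have h0 : ¬ pvFreeStr (a + ((0 : Nat) : Int) + 1) = true := by
    simp only [Nat.cast_zero, add_zero]
    simp [h]
  unfold pvGap
  have hspec := Nat.find_spec (pvFree_exists a)
  set d0 := Nat.find (pvFree_exists a) with hd0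
  have hpos : d0 ≠ 0 := by
    intro h'
    rw [h'] at hspec
    exact h0 hspec
  have hle : Nat.find (pvFree_exists (a + 1)) ≤ d0 - 1 := by
    apply Nat.find_le
    rw [show (a + 1) + ((d0 - 1 : Nat) : Int) + 1 = a + (d0 : Int) + 1 from by omega]
    exact hspec
  omega

-- A's while loop (state: ktora, kolejne, aktualna), step for step
def kolejnaGo (ktora kolejne aktualna : Int) : Int :=
  if kolejne < ktora then
    if pvFreeStr (aktualna + 1) = true then kolejnaGo ktora (kolejne + 1) (aktualna + 1)
    else kolejnaGo ktora kolejne (aktualna + 1)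
  else aktualna
termination_by ((ktora - kolejne).toNat, pvGap aktualna)
decreasing_by
  · exact Prod.Lex.left _ _ (by omega)
  · exact Prod.Lex.right _ (pvGap_lt (by simpa using ‹¬pvFreeStr (aktualna + 1) = true›))

def kolejna (poczatkowa : Int) (ktora : Int) : Int := kolejnaGo ktora 0 poczatkowa

-- ===== PORT B =====
-- B-side helpers (ports of _free, _cnt_below, _decode from Source B)
theorem pvDivShrink {n b : Int} (hb : 1 < b) (h : 0 < n) :
    (PySem.Int.floordiv n b).toNat < n.toNat := by
  rw [PySem.Int.floordiv_eq_ediv_of_pos (by omega : (0 : Int) < b)]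
  have h4 : 0 ≤ n / b := Int.ediv_nonneg (by omega) (by omega)
  have hr0 : 0 ≤ n % b := Int.emod_nonneg n (by omega)
  have hdm : b * (n / b) + n % b = n := Int.ediv_add_emod n b
  have h2 : 2 * (n / b) ≤ b * (n / b) := mul_le_mul_of_nonneg_right (by omega) h4
  have h5 : n / b < n := by linarith
  omega

def pvFreeB (n : Int) : Bool :=
  if h : 0 < n then
    if PySem.Int.mod n 10 = 3 then false else pvFreeB (PySem.Int.floordiv n 10)
  else true
termination_by n.toNat
decreasing_by exact pvDivShrink (by norm_num) h

def pvCntBelow (x : Int) : Int :=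
  if h : x ≤ 0 then 0
  else
    -- q, r = divmod(x, 10)
    let q := PySem.Int.floordiv x 10
    let r := PySem.Int.mod x 10
    9 * pvCntBelow q + (if pvFreeB q then (if r ≤ 3 then r else r - 1) else 0)
termination_by x.toNat
decreasing_by exact pvDivShrink (by norm_num) (by omega)

def pvDecode (m : Int) : Int :=
  if h : m ≤ 0 then 0
  else
    -- q, r = divmod(m, 9)
    let q := PySem.Int.floordiv m 9
    let r := PySem.Int.mod m 9
    10 * pvDecode q + (if r < 3 then r else r + 1)
termination_by m.toNat
decreasing_by exact pvDivShrink (by norm_num) (by omega)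

def kolejna_alt (poczatkowa : Int) (ktora : Int) : Int :=
  if ktora ≤ 0 then poczatkowa
  else
    let g := if 0 ≤ poczatkowa then pvCntBelow (poczatkowa + 1) - 1 else -pvCntBelow (-poczatkowa)
    let j := g + ktora
    if 0 ≤ j then pvDecode j else -pvDecode (-j)

-- ===== PRECONDITION & SPEC =====
def Spec_kolejna (poczatkowa : Int) (ktora : Int) (out : Int) : Prop := out = kolejna_alt poczatkowa ktora
instance (poczatkowa : Int) (ktora : Int) (out : Int) : Decidable (Spec_kolejna poczatkowa ktora out) := by
  unfold Spec_kolejna; infer_instance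

-- ===== CLAIM =====
def Claim_equal_kolejna : Prop := ∀ (poczatkowa : Int) (ktora : Int),
    Dom_kolejna poczatkowa ktora → Spec_kolejna poczatkowa ktora (kolejna poczatkowa ktora)

-- ===== LEMMAS AND PROOFS =====
-- Nat-level model of B's helpers
def rhoN (r : Nat) : Nat := if r ≤ 3 then r else r - 1
def phiN (r : Nat) : Nat := if r < 3 then r else r + 1
def psiN (d : Nat) : Nat := if d < 3 then d else d - 1

def cntN (x : Nat) : Nat :=
  if h : x = 0 then 0 else 9 * cntN (x / 10) + (if pvFreeN (x / 10) then rhoN (x % 10) else 0)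
decreasing_by exact Nat.div_lt_self (Nat.pos_of_ne_zero h) (by norm_num)

def decN (m : Nat) : Nat :=
  if h : m = 0 then 0 else 10 * decN (m / 9) + phiN (m % 9)
decreasing_by exact Nat.div_lt_self (Nat.pos_of_ne_zero h) (by norm_num)

def encN (n : Nat) : Nat :=
  if h : n = 0 then 0 else 9 * encN (n / 10) + psiN (n % 10)
decreasing_by exact Nat.div_lt_self (Nat.pos_of_ne_zero h) (by norm_num)

theorem cntN_zero : cntN 0 = 0 := by rw [cntN]; simp
theorem decN_zero : decN 0 = 0 := by rw [decN]; simp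
theorem cntN_of_ne {x : Nat} (h : x ≠ 0) :
    cntN x = 9 * cntN (x / 10) + (if pvFreeN (x / 10) then rhoN (x % 10) else 0) := by
  rw [cntN, dif_neg h]
theorem decN_of_ne {m : Nat} (h : m ≠ 0) :
    decN m = 10 * decN (m / 9) + phiN (m % 9) := by
  rw [decN, dif_neg h]

-- bridges: Int ports compute the Nat model on casts
theorem pvFreeB_cast (n : Nat) : pvFreeB (n : Int) = pvFreeN n := by
  induction n using Nat.strong_induction_on with
  | _ n ih =>
    by_cases hn : n = 0
    · subst hn
      rw [pvFreeB, pvFreeN]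
      norm_num
    · have hpos : (0 : Int) < (n : Int) := by exact_mod_cast Nat.pos_of_ne_zero hn
      have em : PySem.Int.mod (n : Int) 10 = ((n % 10 : Nat) : Int) := by
        exact_mod_cast PySem.Int.mod_natCast n 10
      have ed : PySem.Int.floordiv (n : Int) 10 = ((n / 10 : Nat) : Int) := by
        exact_mod_cast PySem.Int.floordiv_natCast n 10
      rw [pvFreeB, dif_pos hpos, pvFreeN_of_ne hn, em, ed,
        ih (n / 10) (Nat.div_lt_self (Nat.pos_of_ne_zero hn) (by norm_num))]
      by_cases h3 : n % 10 = 3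
      · simp [h3]
      · have hc : ((n % 10 : Nat) : Int) ≠ 3 := by exact_mod_cast h3
        simp [h3, hc]
        intro _
        omega

theorem pvCntBelow_cast (x : Nat) : pvCntBelow (x : Int) = (cntN x : Int) := by
  induction x using Nat.strong_induction_on with
  | _ x ih =>
    by_cases hx : x = 0
    · subst hx
      rw [pvCntBelow, cntN]
      norm_num
    · have hpos : ¬ ((x : Int) ≤ 0) := by
        have := Nat.pos_of_ne_zero hx
        omega
      have em : PySem.Int.mod (x : Int) 10 = ((x % 10 : Nat) : Int) := by
        exact_mod_cast PySem.Int.mod_natCast x 10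
      have ed : PySem.Int.floordiv (x : Int) 10 = ((x / 10 : Nat) : Int) := by
        exact_mod_cast PySem.Int.floordiv_natCast x 10
      rw [pvCntBelow, dif_neg hpos, cntN_of_ne hx, em, ed]
      dsimp only
      rw [pvFreeB_cast (x / 10), ih (x / 10) (Nat.div_lt_self (Nat.pos_of_ne_zero hx) (by norm_num))]
      have hcond : (((x % 10 : Nat) : Int) ≤ 3) ↔ (x % 10 ≤ 3) := by exact_mod_cast Iff.rfl
      by_cases hf : pvFreeN (x / 10) <;> by_cases hr : x % 10 ≤ 3 <;>
        simp [hf, hr, hcond, rhoN] <;> push_cast <;> omega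

theorem pvDecode_cast (m : Nat) : pvDecode (m : Int) = (decN m : Int) := by
  induction m using Nat.strong_induction_on with
  | _ m ih =>
    by_cases hm : m = 0
    · subst hm
      rw [pvDecode, decN]
      norm_num
    · have hpos : ¬ ((m : Int) ≤ 0) := by
        have := Nat.pos_of_ne_zero hm
        omega
      have em : PySem.Int.mod (m : Int) 9 = ((m % 9 : Nat) : Int) := by
        exact_mod_cast PySem.Int.mod_natCast m 9
      have ed : PySem.Int.floordiv (m : Int) 9 = ((m / 9 : Nat) : Int) := by
        exact_mod_cast PySem.Int.floordiv_natCast m 9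
      rw [pvDecode, dif_neg hpos, decN_of_ne hm, em, ed]
      dsimp only
      rw [ih (m / 9) (Nat.div_lt_self (Nat.pos_of_ne_zero hm) (by norm_num))]
      have hcond : (((m % 9 : Nat) : Int) < 3) ↔ (m % 9 < 3) := by exact_mod_cast Iff.rfl
      by_cases hr : m % 9 < 3 <;> simp [hr, hcond, phiN] <;> push_cast <;> omega

-- decN facts
theorem decN_step (q s : Nat) (hs : s < 9) : decN (9 * q + s) = 10 * decN q + phiN s := by
  by_cases h : 9 * q + s = 0
  · have hq : q = 0 := by omega
    have hs0 : s = 0 := by omega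
    subst hq; subst hs0
    rw [decN_zero]
    simp [decN_zero, phiN]
  · rw [decN_of_ne h]
    have e1 : (9 * q + s) / 9 = q := by omega
    have e2 : (9 * q + s) % 9 = s := by omega
    rw [e1, e2]

theorem decN_eq (n : Nat) : decN n = 10 * decN (n / 9) + phiN (n % 9) := by
  have h := decN_step (n / 9) (n % 9) (by omega)
  rw [show 9 * (n / 9) + n % 9 = n from by omega] at h
  exact h

theorem decN_mono {a b : Nat} (h : a < b) : decN a < decN b := by
  induction b using Nat.strong_induction_on generalizing a with
  | _ b ih =>
    rw [decN_eq a, decN_eq b]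
    have h9 : a / 9 ≤ b / 9 := Nat.div_le_div_right (le_of_lt h)
    have hphia : phiN (a % 9) < 10 := by unfold phiN; split_ifs <;> omega
    have hphib : phiN (b % 9) < 10 := by unfold phiN; split_ifs <;> omega
    rcases eq_or_lt_of_le h9 with heq | hlt
    · rw [heq]
      have hmod : a % 9 < b % 9 := by omega
      have hphi : phiN (a % 9) < phiN (b % 9) := by unfold phiN; split_ifs <;> omega
      omega
    · have hblt : b / 9 < b := by omega
      have := ih (b / 9) hblt hlt
      omega

theorem decN_le_mono {a b : Nat} (h : a ≤ b) : decN a ≤ decN b := by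
  rcases eq_or_lt_of_le h with rfl | hlt
  · exact le_rfl
  · exact le_of_lt (decN_mono hlt)

theorem decN_lt_reflect {a b : Nat} (h : decN a < decN b) : a < b := by
  by_contra hc
  have := decN_le_mono (show b ≤ a by omega)
  omega

theorem decN_pos {m : Nat} (h : 1 ≤ m) : 1 ≤ decN m := by
  have := decN_mono (show 0 < m from h)
  rw [decN_zero] at this
  omega

theorem decN_free (m : Nat) : pvFreeN (decN m) = true := by
  induction m using Nat.strong_induction_on with
  | _ m ih =>
    by_cases hm : m = 0
    · subst hm
      rw [decN_zero]
      exact pvFreeN_zero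
    · rw [decN_eq m]
      have hphi1 : phiN (m % 9) < 10 := by unfold phiN; split_ifs <;> omega
      have hphi3 : phiN (m % 9) ≠ 3 := by unfold phiN; split_ifs <;> omega
      by_cases hz : 10 * decN (m / 9) + phiN (m % 9) = 0
      · rw [hz]; exact pvFreeN_zero
      · rw [pvFreeN_of_ne hz]
        have e1 : (10 * decN (m / 9) + phiN (m % 9)) % 10 = phiN (m % 9) := by omega
        have e2 : (10 * decN (m / 9) + phiN (m % 9)) / 10 = decN (m / 9) := by omega
        rw [e1, e2, ih (m / 9) (Nat.div_lt_self (Nat.pos_of_ne_zero hm) (by norm_num))]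
        simp [hphi3]

theorem decN_encN {n : Nat} (h : pvFreeN n = true) : decN (encN n) = n := by
  induction n using Nat.strong_induction_on with
  | _ n ih =>
    by_cases hn : n = 0
    · subst hn
      rw [encN]
      simp [decN_zero]
    · have hh := h
      rw [pvFreeN_of_ne hn, Bool.and_eq_true] at hh
      obtain ⟨h3d, hq⟩ := hh
      have h3 : n % 10 ≠ 3 := of_decide_eq_true h3d
      rw [encN, dif_neg hn]
      have hd : n % 10 < 10 := by omega
      have hpsi : psiN (n % 10) < 9 := by unfold psiN; split_ifs <;> omega
      rw [decN_step _ _ hpsi,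
        ih (n / 10) (Nat.div_lt_self (Nat.pos_of_ne_zero hn) (by norm_num)) hq]
      have hps : phiN (psiN (n % 10)) = n % 10 := by unfold phiN psiN; split_ifs <;> omega
      rw [hps]
      omega

-- counting facts
theorem cntN_step (x : Nat) : cntN (x + 1) = cntN x + (if pvFreeN x then 1 else 0) := by
  induction x using Nat.strong_induction_on with
  | _ x ih =>
    by_cases hx : x = 0
    · subst hx
      rw [cntN_of_ne (by norm_num : (1 : Nat) ≠ 0)]
      norm_num [cntN_zero, pvFreeN_zero, rhoN]
    · have hq : x / 10 < x := Nat.div_lt_self (Nat.pos_of_ne_zero hx) (by norm_num)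
      by_cases hr : x % 10 = 9
      · have e1 : (x + 1) / 10 = x / 10 + 1 := by omega
        have e2 : (x + 1) % 10 = 0 := by omega
        rw [cntN_of_ne (by omega : x + 1 ≠ 0), e1, e2, ih (x / 10) hq, cntN_of_ne hx, hr]
        have hfx : pvFreeN x = pvFreeN (x / 10) := by
          rw [pvFreeN_of_ne hx, hr]
          norm_num
        rw [hfx]
        by_cases hf : pvFreeN (x / 10) <;> simp [hf, rhoN] <;> omega
      · have e1 : (x + 1) / 10 = x / 10 := by omega
        have e2 : (x + 1) % 10 = x % 10 + 1 := by omega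
        rw [cntN_of_ne (by omega : x + 1 ≠ 0), e1, e2, cntN_of_ne hx]
        have hfx : pvFreeN x = ((decide (x % 10 ≠ 3)) && pvFreeN (x / 10)) := pvFreeN_of_ne hx
        by_cases hf : pvFreeN (x / 10)
        · by_cases h3 : x % 10 = 3
          · rw [hfx, h3]
            norm_num [rhoN, hf]
          · have hrho : rhoN (x % 10 + 1) = rhoN (x % 10) + 1 := by
              unfold rhoN
              have : x % 10 < 9 := by omega
              split_ifs <;> omega
            rw [hfx, hrho]
            simp [hf, h3]
            omega
        · simp [hfx, hf]

theorem cntN_eq_card (x : Nat) :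
    cntN x = ((Finset.range x).filter (fun n => pvFreeN n = true)).card := by
  induction x with
  | zero => simp [cntN_zero]
  | succ x ih =>
    rw [cntN_step, ih, Finset.range_add_one, Finset.filter_insert]
    split_ifs with hf
    · rw [Finset.card_insert_of_notMem (by simp)]
    · simp

theorem cntN_pos (n : Nat) : 1 ≤ cntN (n + 1) := by
  induction n with
  | zero =>
    show 1 ≤ cntN 1
    rw [cntN_of_ne one_ne_zero]
    norm_num [cntN_zero, pvFreeN_zero, rhoN]
  | succ n ih =>
    rw [cntN_step]
    split_ifs <;> omega

theorem le_decN_cntN (x : Nat) : x ≤ decN (cntN x) := by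
  by_contra hlt
  push_neg at hlt
  have hmaps : ∀ m ∈ Finset.range (cntN x + 1),
      decN m ∈ (Finset.range x).filter (fun n => pvFreeN n = true) := by
    intro m hm
    simp only [Finset.mem_range] at hm
    have h1 : decN m ≤ decN (cntN x) := decN_le_mono (by omega)
    simp only [Finset.mem_filter, Finset.mem_range]
    exact ⟨by omega, decN_free m⟩
  have hinj : Set.InjOn (fun m => decN m) (Finset.range (cntN x + 1)) := by
    intro a _ b _ hab
    by_contra hne
    rcases Nat.lt_or_ge a b with hab' | hab'
    · exact absurd hab (Nat.ne_of_lt (decN_mono hab'))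
    · have hba : b < a := by omega
      exact absurd hab.symm (Nat.ne_of_lt (decN_mono hba))
  have hcard := Finset.card_le_card_of_injOn _ hmaps hinj
  rw [Finset.card_range, ← cntN_eq_card] at hcard
  omega

theorem decN_cntN_le (p : Nat) : decN (cntN (p + 1) - 1) ≤ p := by
  by_contra hlt
  push_neg at hlt
  have hc1 := cntN_pos p
  have hmaps : ∀ n ∈ (Finset.range (p + 1)).filter (fun n => pvFreeN n = true),
      encN n ∈ Finset.range (cntN (p + 1) - 1) := by
    intro n hn
    simp only [Finset.mem_filter, Finset.mem_range] at hn
    obtain ⟨hnp, hfree⟩ := hn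
    have hdec : decN (encN n) = n := decN_encN hfree
    have hlt2 : decN (encN n) < decN (cntN (p + 1) - 1) := by omega
    exact Finset.mem_range.mpr (decN_lt_reflect hlt2)
  have hinj : Set.InjOn (fun n => encN n)
      ((Finset.range (p + 1)).filter (fun n => pvFreeN n = true)) := by
    intro a ha b hb hab
    simp only [Finset.coe_filter, Set.mem_setOf_eq, Finset.mem_range] at ha hb
    have he : decN (encN a) = decN (encN b) := by simp only [hab]
    rw [decN_encN ha.2, decN_encN hb.2] at he
    exact he
  have hcard := Finset.card_le_card_of_injOn _ hmaps hinj
  rw [Finset.card_range, ← cntN_eq_card] at hcard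
  omega

theorem decN_cntN_of_free {n : Nat} (h : pvFreeN n = true) : decN (cntN n) = n := by
  have h1 := le_decN_cntN n
  have h2 := decN_cntN_le n
  have h3 : cntN (n + 1) = cntN n + 1 := by rw [cntN_step]; simp [h]
  rw [h3, Nat.add_sub_cancel] at h2
  omega

-- Int-level enumeration F (j-th 3-free integer) and rank G
def FZ (j : Int) : Int := if 0 ≤ j then (decN j.toNat : Int) else -(decN (-j).toNat : Int)
def GZ (x : Int) : Int :=
  if 0 ≤ x then (cntN (x.toNat + 1) : Int) - 1 else -(cntN (-x).toNat : Int)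

theorem FZ_mono {i j : Int} (h : i < j) : FZ i < FZ j := by
  unfold FZ
  by_cases hi : 0 ≤ i
  · rw [if_pos hi, if_pos (by omega)]
    have ht : i.toNat < j.toNat := by omega
    exact_mod_cast decN_mono ht
  · rw [if_neg hi]
    by_cases hj : 0 ≤ j
    · rw [if_pos hj]
      have h1 : 1 ≤ (-i).toNat := by omega
      have h2 : 1 ≤ decN (-i).toNat := decN_pos h1
      have h3 : (1 : Int) ≤ (decN (-i).toNat : Int) := by exact_mod_cast h2
      have h4 : (0 : Int) ≤ (decN j.toNat : Int) := by positivity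
      omega
    · rw [if_neg hj]
      have ht : (-j).toNat < (-i).toNat := by omega
      have h2 := decN_mono ht
      have h3 : (decN (-j).toNat : Int) < (decN (-i).toNat : Int) := by exact_mod_cast h2
      omega

theorem FZ_le_mono {i j : Int} (h : i ≤ j) : FZ i ≤ FZ j := by
  rcases eq_or_lt_of_le h with rfl | hlt
  · exact le_rfl
  · exact le_of_lt (FZ_mono hlt)

theorem FZ_lt_reflect {i j : Int} (h : FZ i < FZ j) : i < j := by
  by_contra hc
  have := FZ_le_mono (show j ≤ i by omega)
  omega

theorem GZ_bracket (x : Int) : FZ (GZ x) ≤ x ∧ x < FZ (GZ x + 1) := by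
  by_cases hx : 0 ≤ x
  · have hc := cntN_pos x.toNat
    have hcI : (1 : Int) ≤ (cntN (x.toNat + 1) : Int) := by exact_mod_cast hc
    have hG : GZ x = (cntN (x.toNat + 1) : Int) - 1 := by unfold GZ; rw [if_pos hx]
    constructor
    · rw [hG]
      unfold FZ
      rw [if_pos (by omega)]
      have ht : ((cntN (x.toNat + 1) : Int) - 1).toNat = cntN (x.toNat + 1) - 1 := by omega
      rw [ht]
      have h1 := decN_cntN_le x.toNat
      omega
    · rw [hG]
      unfold FZ
      rw [if_pos (by omega)]
      have ht : ((cntN (x.toNat + 1) : Int) - 1 + 1).toNat = cntN (x.toNat + 1) := by omega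
      rw [ht]
      have h1 := le_decN_cntN (x.toNat + 1)
      omega
  · have hG : GZ x = -(cntN (-x).toNat : Int) := by unfold GZ; rw [if_neg hx]
    have hn1 : 1 ≤ (-x).toNat := by omega
    have hc : 1 ≤ cntN (-x).toNat := by
      have he : ((-x).toNat - 1) + 1 = (-x).toNat := by omega
      rw [← he]
      exact cntN_pos _
    have hcI : (1 : Int) ≤ (cntN (-x).toNat : Int) := by exact_mod_cast hc
    constructor
    · rw [hG]
      unfold FZ
      rw [if_neg (by omega)]
      have ht : (-(-(cntN (-x).toNat : Int))).toNat = cntN (-x).toNat := by omega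
      rw [ht]
      have h1 := le_decN_cntN (-x).toNat
      omega
    · rw [hG]
      by_cases hc1 : cntN (-x).toNat = 1
      · have he0 : -(cntN (-x).toNat : Int) + 1 = 0 := by rw [hc1]; norm_num
        rw [he0]
        unfold FZ
        rw [if_pos le_rfl]
        have : ((0 : Int)).toNat = 0 := rfl
        rw [this, decN_zero]
        omega
      · have hc2 : 2 ≤ cntN (-x).toNat := by omega
        have hc2I : (2 : Int) ≤ (cntN (-x).toNat : Int) := by exact_mod_cast hc2
        unfold FZ
        rw [if_neg (by omega)]
        have ht : (-(-(cntN (-x).toNat : Int) + 1)).toNat = cntN (-x).toNat - 1 := by omega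
        rw [ht]
        have h1 : decN (cntN (((-x).toNat - 1) + 1) - 1) ≤ (-x).toNat - 1 := decN_cntN_le _
        have he : ((-x).toNat - 1) + 1 = (-x).toNat := by omega
        rw [he] at h1
        omega

theorem FZ_GZ_of_free {x : Int} (h : pvFreeN x.natAbs = true) : FZ (GZ x) = x := by
  by_cases hx : 0 ≤ x
  · have hnat : x.natAbs = x.toNat := by omega
    rw [hnat] at h
    have h3 : cntN (x.toNat + 1) = cntN x.toNat + 1 := by rw [cntN_step]; simp [h]
    have hG : GZ x = (cntN x.toNat : Int) := by
      unfold GZ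
      rw [if_pos hx, h3]
      push_cast
      ring
    rw [hG]
    unfold FZ
    rw [if_pos (by positivity)]
    have ht : ((cntN x.toNat : Int)).toNat = cntN x.toNat := by omega
    rw [ht, decN_cntN_of_free h]
    omega
  · have hnat : x.natAbs = (-x).toNat := by omega
    rw [hnat] at h
    have hG : GZ x = -(cntN (-x).toNat : Int) := by unfold GZ; rw [if_neg hx]
    have hn1 : 1 ≤ (-x).toNat := by omega
    have hc : 1 ≤ cntN (-x).toNat := by
      have he : ((-x).toNat - 1) + 1 = (-x).toNat := by omega
      rw [← he]
      exact cntN_pos _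
    have hcI : (1 : Int) ≤ (cntN (-x).toNat : Int) := by exact_mod_cast hc
    rw [hG]
    unfold FZ
    rw [if_neg (by omega)]
    have ht : (-(-(cntN (-x).toNat : Int))).toNat = cntN (-x).toNat := by omega
    rw [ht, decN_cntN_of_free h]
    omega

theorem GZ_eq_of_bracket {x j : Int} (h1 : FZ j ≤ x) (h2 : x < FZ (j + 1)) : GZ x = j := by
  obtain ⟨b1, b2⟩ := GZ_bracket x
  by_contra hne
  rcases lt_or_gt_of_ne hne with hlt | hgt
  · have hle : GZ x + 1 ≤ j := by omega
    have := FZ_le_mono hle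
    omega
  · have hle : j + 1 ≤ GZ x := by omega
    have := FZ_le_mono hle
    omega

theorem FZ_free (j : Int) : pvFreeN (FZ j).natAbs = true := by
  unfold FZ
  by_cases h0 : 0 ≤ j
  · rw [if_pos h0]
    simp only [Int.natAbs_natCast]
    exact decN_free _
  · rw [if_neg h0]
    simp only [Int.natAbs_neg, Int.natAbs_natCast]
    exact decN_free _

theorem GZ_succ_free {x : Int} (h : pvFreeN (x + 1).natAbs = true) :
    GZ (x + 1) = GZ x + 1 ∧ FZ (GZ x + 1) = x + 1 := by
  obtain ⟨b1, b2⟩ := GZ_bracket x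
  have hfix : FZ (GZ (x + 1)) = x + 1 := FZ_GZ_of_free h
  have hlt : GZ x < GZ (x + 1) := by
    apply FZ_lt_reflect
    omega
  have hle : FZ (GZ x + 1) ≤ x + 1 := by
    calc FZ (GZ x + 1) ≤ FZ (GZ (x + 1)) := FZ_le_mono (by omega)
    _ = x + 1 := hfix
  have heq : FZ (GZ x + 1) = x + 1 := by omega
  refine ⟨?_, heq⟩
  have hnext := FZ_mono (show GZ x + 1 < GZ x + 1 + 1 by omega)
  exact GZ_eq_of_bracket (by omega) (by omega)

theorem GZ_succ_not_free {x : Int} (h : pvFreeN (x + 1).natAbs = false) : GZ (x + 1) = GZ x := by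
  obtain ⟨b1, b2⟩ := GZ_bracket x
  have hfree := FZ_free (GZ x + 1)
  have hne : FZ (GZ x + 1) ≠ x + 1 := by
    intro he
    rw [he, h] at hfree
    exact absurd hfree (by simp)
  exact GZ_eq_of_bracket (by omega) (by omega)

theorem kolejnaGo_eq (ktora kolejne aktualna : Int) :
    kolejnaGo ktora kolejne aktualna =
      if kolejne < ktora then FZ (GZ aktualna + (ktora - kolejne)) else aktualna := by
  induction kolejne, aktualna using kolejnaGo.induct ktora with
  | case1 j a hjk hfree ih =>
    rw [kolejnaGo, if_pos hjk, if_pos hfree, ih]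
    have hf : pvFreeN (a + 1).natAbs = true := by rw [← pvFreeStr_eq]; exact hfree
    obtain ⟨hg, hfz⟩ := GZ_succ_free hf
    by_cases hjk1 : j + 1 < ktora
    · rw [if_pos hjk1, if_pos hjk, hg]
      rw [show GZ a + 1 + (ktora - (j + 1)) = GZ a + (ktora - j) from by ring]
    · rw [if_neg hjk1, if_pos hjk]
      rw [show ktora - j = 1 from by omega]
      exact hfz.symm
  | case2 j a hjk hfree ih =>
    rw [kolejnaGo, if_pos hjk, if_neg hfree, ih]
    have hf : pvFreeN (a + 1).natAbs = false := by
      rw [← pvFreeStr_eq]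
      simpa using hfree
    rw [GZ_succ_not_free hf, if_pos hjk, if_pos hjk]
  | case3 j a hjk =>
    rw [kolejnaGo, if_neg hjk, if_neg hjk]

theorem kolejna_alt_eq (p k : Int) :
    kolejna_alt p k = if k ≤ 0 then p else FZ (GZ p + k) := by
  unfold kolejna_alt
  by_cases hk : k ≤ 0
  · rw [if_pos hk, if_pos hk]
  · rw [if_neg hk, if_neg hk]
    have hg : (if 0 ≤ p then pvCntBelow (p + 1) - 1 else -pvCntBelow (-p)) = GZ p := by
      unfold GZ
      by_cases hp : 0 ≤ p
      · have hcb : pvCntBelow (p + 1) = (cntN (p.toNat + 1) : Int) := by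
          conv_lhs => rw [show p + 1 = ((p.toNat + 1 : Nat) : Int) from by omega]
          exact pvCntBelow_cast _
        rw [if_pos hp, if_pos hp, hcb]
      · have hcb : pvCntBelow (-p) = (cntN (-p).toNat : Int) := by
          conv_lhs => rw [show -p = (((-p).toNat : Nat) : Int) from by omega]
          exact pvCntBelow_cast _
        rw [if_neg hp, if_neg hp, hcb]
    rw [hg]
    unfold FZ
    by_cases hjn : 0 ≤ GZ p + k
    · rw [if_pos hjn, if_pos hjn]
      conv_lhs => rw [show GZ p + k = (((GZ p + k).toNat : Nat) : Int) from by omega]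
      rw [pvDecode_cast]
    · rw [if_neg hjn, if_neg hjn]
      conv_lhs => rw [show -(GZ p + k) = (((-(GZ p + k)).toNat : Nat) : Int) from by omega]
      rw [pvDecode_cast]

-- ===== VERDICT =====
theorem kolejna_spec : Claim_equal_kolejna := by
  intro p k _
  unfold Spec_kolejna
  rw [kolejna_alt_eq]
  show kolejnaGo k 0 p = _
  rw [kolejnaGo_eq]
  by_cases hk : k ≤ 0
  · rw [if_neg (by omega : ¬ (0 : Int) < k), if_pos hk]
  · rw [if_pos (by omega : (0 : Int) < k), if_neg hk, sub_zero]
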